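-- pv_equiv track=rewrite | github.com/MF07-Language-Programing/mf07-language | src/corplang/executor/db/migrations.py | _generate_migration_name
-- ===== SOURCE A (Python) =====
-- from typing import Any, Dict, List
--
-- def _generate_migration_name(ops: List[Dict[str, Any]]) -> str:
--     """Generate short descriptive name for migration based on operations."""
--     if not ops:
--         return "empty"
--
--     names = []
--     for op in ops[:3]:
--         op_type = op.get("op") or op.get("type", "")
--         if op_type == "create_model":
--             model = op.get("model", "")
--             names.append(f"create_{model.lower()}")
--         elif op_type == "add_column":
--             field = op.get("field_name", "")
--             names.append(f"add_{field}")
--         elif op_type == "drop_column":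
--             field = op.get("field_name", "")
--             names.append(f"drop_{field}")
--         elif op_type == "alter_column":
--             field = op.get("field_name", "")
--             names.append(f"alter_{field}")
--         elif op_type == "create_enum":
--             enum = op.get("name", "")
--             names.append(f"enum_{enum.lower()}")
--         elif op_type == "add_fk":
--             field = op.get("field", "")
--             names.append(f"fk_{field}")
--         elif op_type == "drop_model":
--             model = op.get("model", "")
--             names.append(f"drop_{model.lower()}")
--
--     return "_".join(names[:2]) if names else "migration"
-- ===== SOURCE B (Python) =====
-- from typing import Any, Dict, List, Optional
--
-- def _name_of(op: Dict[str, Any]) -> Optional[str]: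
--     t = op.get("op") or op.get("type", "")
--     match t:
--         case "create_model":
--             return "create_" + op.get("model", "").lower()
--         case "add_column":
--             return "add_" + op.get("field_name", "")
--         case "drop_column":
--             return "drop_" + op.get("field_name", "")
--         case "alter_column":
--             return "alter_" + op.get("field_name", "")
--         case "create_enum":
--             return "enum_" + op.get("name", "").lower()
--         case "add_fk":
--             return "fk_" + op.get("field", "")
--         case "drop_model":
--             return "drop_" + op.get("model", "").lower()
--         case _:
--             return None
--
-- def _scan(ops: List[Dict[str, Any]], budget: int, first: Optional[str]) -> str:
--     if budget == 0 or not ops: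
--         return "migration" if first is None else first
--     name = _name_of(ops[0])
--     if name is None:
--         return _scan(ops[1:], budget - 1, first)
--     if first is None:
--         return _scan(ops[1:], budget - 1, name)
--     return first + "_" + name
--
-- def _generate_migration_name(ops: List[Dict[str, Any]]) -> str:
--     if not ops:
--         return "empty"
--     return _scan(ops, 3, None)
-- ===== Notes on version B (the rewrite author's own statement) =====
-- stated objective: alternative
-- what changed: Replaces the list-accumulating loop plus names[:2] slice and '_'.join with a direct recursive scan that carries at most one already-found name, returns the joined string the moment a second name is found, and never builds a list.
import Mathlib
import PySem

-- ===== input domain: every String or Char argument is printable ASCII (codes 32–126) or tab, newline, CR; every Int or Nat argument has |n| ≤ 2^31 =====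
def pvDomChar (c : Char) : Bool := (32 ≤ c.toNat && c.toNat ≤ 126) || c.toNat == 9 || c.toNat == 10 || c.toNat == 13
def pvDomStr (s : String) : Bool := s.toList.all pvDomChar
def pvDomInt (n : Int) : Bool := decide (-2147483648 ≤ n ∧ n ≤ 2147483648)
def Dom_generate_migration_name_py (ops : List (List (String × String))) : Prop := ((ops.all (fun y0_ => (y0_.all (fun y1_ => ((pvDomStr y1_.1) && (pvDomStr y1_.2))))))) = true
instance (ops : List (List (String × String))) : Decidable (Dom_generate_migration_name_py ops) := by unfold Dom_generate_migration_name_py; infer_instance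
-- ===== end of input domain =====

-- B replaces A's list-accumulating loop + names[:2] slice + '_'.join with a direct recursive scan
-- that carries at most one found name and returns the joined string as soon as a second is found.

-- shared helper: both Pythons contain the literal expression `op.get("op") or op.get("type", "")`
def pvOpType (op : List (String × String)) : String :=
  match (PySem.Dict.mk op).get? "op" with
  | some s => if s = "" then (PySem.Dict.mk op).getD "type" "" else s
  | none => (PySem.Dict.mk op).getD "type" ""

-- ===== PORT A =====
def generate_migration_name_py (ops : List (List (String × String))) : String :=
  if ops = [] then "empty" else
  let names := (ops.take 3).foldl (fun names op =>
    let op_type := pvOpType op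
    if op_type = "create_model" then
      names ++ ["create_" ++ PySem.Str.lower ((PySem.Dict.mk op).getD "model" "")]
    else if op_type = "add_column" then
      names ++ ["add_" ++ (PySem.Dict.mk op).getD "field_name" ""]
    else if op_type = "drop_column" then
      names ++ ["drop_" ++ (PySem.Dict.mk op).getD "field_name" ""]
    else if op_type = "alter_column" then
      names ++ ["alter_" ++ (PySem.Dict.mk op).getD "field_name" ""]
    else if op_type = "create_enum" then
      names ++ ["enum_" ++ PySem.Str.lower ((PySem.Dict.mk op).getD "name" "")]
    else if op_type = "add_fk" then
      names ++ ["fk_" ++ (PySem.Dict.mk op).getD "field" ""]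
    else if op_type = "drop_model" then
      names ++ ["drop_" ++ PySem.Str.lower ((PySem.Dict.mk op).getD "model" "")]
    else names) []
  if names = [] then "migration" else PySem.Str.join "_" (names.take 2)

-- ===== PORT B =====
-- B's `_name_of`: the name one op contributes, or none (Python match/case → string if-chain)
def pvNameOf (op : List (String × String)) : Option String :=
  let t := pvOpType op
  if t = "create_model" then some ("create_" ++ PySem.Str.lower ((PySem.Dict.mk op).getD "model" ""))
  else if t = "add_column" then some ("add_" ++ (PySem.Dict.mk op).getD "field_name" "")
  else if t = "drop_column" then some ("drop_" ++ (PySem.Dict.mk op).getD "field_name" "")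
  else if t = "alter_column" then some ("alter_" ++ (PySem.Dict.mk op).getD "field_name" "")
  else if t = "create_enum" then some ("enum_" ++ PySem.Str.lower ((PySem.Dict.mk op).getD "name" ""))
  else if t = "add_fk" then some ("fk_" ++ (PySem.Dict.mk op).getD "field" "")
  else if t = "drop_model" then some ("drop_" ++ PySem.Str.lower ((PySem.Dict.mk op).getD "model" ""))
  else none

-- B's `_scan`: recursion on the budget (3 at the top call), carrying the first found name
def pvScan : List (List (String × String)) → Nat → Option String → String
  | _, 0, first => match first with | none => "migration" | some f => f
  | [], _, first => match first with | none => "migration" | some f => f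
  | op :: rest, Nat.succ b, first =>
    match pvNameOf op with
    | none => pvScan rest b first
    | some name =>
      match first with
      | none => pvScan rest b (some name)
      | some f => f ++ "_" ++ name

def generate_migration_name_py_alt (ops : List (List (String × String))) : String :=
  if ops = [] then "empty" else pvScan ops 3 none

-- ===== PRECONDITION & SPEC =====
def Spec_generate_migration_name_py (ops : List (List (String × String))) (out : String) : Prop := out = generate_migration_name_py_alt ops
instance (ops : List (List (String × String))) (out : String) : Decidable (Spec_generate_migration_name_py ops out) := by unfold Spec_generate_migration_name_py; infer_instance

-- ===== CLAIM =====
def Claim_equal_generate_migration_name_py : Prop := ∀ (ops : List (List (String × String))), Dom_generate_migration_name_py ops → Spec_generate_migration_name_py ops (generate_migration_name_py ops)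

-- ===== LEMMAS AND PROOFS =====

lemma foldA_eq (l : List (List (String × String))) (names : List String) :
    l.foldl (fun names op =>
      let op_type := pvOpType op
      if op_type = "create_model" then
        names ++ ["create_" ++ PySem.Str.lower ((PySem.Dict.mk op).getD "model" "")]
      else if op_type = "add_column" then
        names ++ ["add_" ++ (PySem.Dict.mk op).getD "field_name" ""]
      else if op_type = "drop_column" then
        names ++ ["drop_" ++ (PySem.Dict.mk op).getD "field_name" ""]
      else if op_type = "alter_column" then
        names ++ ["alter_" ++ (PySem.Dict.mk op).getD "field_name" ""]
      else if op_type = "create_enum" then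
        names ++ ["enum_" ++ PySem.Str.lower ((PySem.Dict.mk op).getD "name" "")]
      else if op_type = "add_fk" then
        names ++ ["fk_" ++ (PySem.Dict.mk op).getD "field" ""]
      else if op_type = "drop_model" then
        names ++ ["drop_" ++ PySem.Str.lower ((PySem.Dict.mk op).getD "model" "")]
      else names) names
    = names ++ l.filterMap pvNameOf := by
  induction l generalizing names with
  | nil => simp
  | cons op rest ih =>
    rw [List.foldl_cons, List.filterMap_cons]
    have hstep : (let op_type := pvOpType op
      if op_type = "create_model" then
        names ++ ["create_" ++ PySem.Str.lower ((PySem.Dict.mk op).getD "model" "")]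
      else if op_type = "add_column" then
        names ++ ["add_" ++ (PySem.Dict.mk op).getD "field_name" ""]
      else if op_type = "drop_column" then
        names ++ ["drop_" ++ (PySem.Dict.mk op).getD "field_name" ""]
      else if op_type = "alter_column" then
        names ++ ["alter_" ++ (PySem.Dict.mk op).getD "field_name" ""]
      else if op_type = "create_enum" then
        names ++ ["enum_" ++ PySem.Str.lower ((PySem.Dict.mk op).getD "name" "")]
      else if op_type = "add_fk" then
        names ++ ["fk_" ++ (PySem.Dict.mk op).getD "field" ""]
      else if op_type = "drop_model" then
        names ++ ["drop_" ++ PySem.Str.lower ((PySem.Dict.mk op).getD "model" "")]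
      else names) = names ++ (pvNameOf op).toList := by
      simp only [pvNameOf]
      split_ifs <;> simp
    rw [hstep]
    cases h : pvNameOf op <;> simp [ih]

lemma scan_some (l : List (List (String × String))) (b : Nat) (f : String) :
    pvScan l b (some f) =
      match (l.take b).filterMap pvNameOf with
      | [] => f
      | n :: _ => f ++ "_" ++ n := by
  induction l generalizing b with
  | nil => cases b <;> simp [pvScan]
  | cons op rest ih =>
    cases b with
    | zero => simp [pvScan]
    | succ b =>
      rw [List.take_succ_cons, List.filterMap_cons]
      cases h : pvNameOf op with
      | none => simp [pvScan, h, ih]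
      | some n => simp [pvScan, h]

lemma scan_none (l : List (List (String × String))) (b : Nat) :
    pvScan l b none =
      match (l.take b).filterMap pvNameOf with
      | [] => "migration"
      | [a] => a
      | a :: n :: _ => a ++ "_" ++ n := by
  induction l generalizing b with
  | nil => cases b <;> simp [pvScan]
  | cons op rest ih =>
    cases b with
    | zero => simp [pvScan]
    | succ b =>
      rw [List.take_succ_cons, List.filterMap_cons]
      cases h : pvNameOf op with
      | none => simp [pvScan, h, ih]
      | some n =>
        simp only [pvScan, h, Option.toList_some, List.cons_append, List.nil_append]
        rw [scan_some]
        cases hm : (rest.take b).filterMap pvNameOf <;> simp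

lemma join_two (a n : String) :
    PySem.Str.join "_" [a, n] = a ++ "_" ++ n := by
  apply String.toList_inj.mp
  simp [PySem.Str.join, PySem.Chars.join, List.intercalate, String.toList_ofList]

lemma join_one (a : String) :
    PySem.Str.join "_" [a] = a := by
  apply String.toList_inj.mp
  simp [PySem.Str.join, PySem.Chars.join, List.intercalate, String.toList_ofList]

-- ===== VERDICT =====
theorem generate_migration_name_py_spec : Claim_equal_generate_migration_name_py := by
  intro ops _
  unfold Spec_generate_migration_name_py generate_migration_name_py generate_migration_name_py_alt
  by_cases h : ops = []
  · simp [h]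
  · simp only [if_neg h]
    rw [foldA_eq, List.nil_append, scan_none]
    cases hm : (ops.take 3).filterMap pvNameOf with
    | nil => simp
    | cons a t =>
      cases t with
      | nil => simp [join_one]
      | cons n t' => simp [join_two]
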